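-- pv_equiv track=rewrite | github.com/kazjol/core2 | leetcode/core/dp 问题/背包/2024E_充电设备_5.27.py | max_sum_hash
-- ===== SOURCE A (Python) =====
-- from typing import List
-- from collections import defaultdict
--
-- def max_sum_hash(n:int,devices:List[int],p_max:int)->int:
--     dp = set() # 集合是哈希类型 可以用匹配制
--     dp.add(0) # 初始化，0功率一定能取得
--     for device in devices: # 遍历每个设备 对每个功率能否取到判断 所以还是要嵌套遍历全部功率
--         # for i in range(1, p_max + 1):
--         for p in list(dp): # 遍历继承来的dp集合 并更新 ***因为for是要用迭代器自动以步长1遍历的 set是哈希集合只满足匹配制不可索引***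
--             if p + device <= p_max: # 继承并更新每个设备能取到的最大功率dp集合
--                 dp.add(p + device) # 继承并更新每个设备能取到的最大功率dp集合 下一个设备自动继承dp的功率更新（上一个设备的更新）
--     return max(dp)
--
-- devices = [1, 2, 2, 3, 5]
--
-- p_max = 6
--
-- dp = defaultdict(int)
-- ===== SOURCE B (Python) =====
-- def max_sum_hash(n, devices, p_max):
--     # Top-down take/skip DP: best(i, cur) = greatest final sum reachable from
--     # partial sum cur using devices[i:], pruning branches that would exceed p_max.
--     # Memoised on (i, cur); driven by an explicit stack (stage machine) so that
--     # long device lists do not hit Python's recursion limit.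
--     memo = {}
--     ret = 0
--     stack = [(0, 0, 0, 0)]  # frames: (i, cur, stage, saved_res)
--     while stack:
--         i, cur, stage, res = stack.pop()
--         if i == len(devices):
--             ret = cur
--             continue
--         key = (i, cur)
--         if stage == 0:
--             if key in memo:
--                 ret = memo[key]
--                 continue
--             stack.append((i, cur, 1, 0))      # resume after the skip branch
--             stack.append((i + 1, cur, 0, 0))  # skip devices[i]
--         elif stage == 1:
--             res = ret                          # value of the skip branch
--             nxt = cur + devices[i]
--             if nxt <= p_max:
--                 stack.append((i, cur, 2, res))     # resume after the take branch
--                 stack.append((i + 1, nxt, 0, 0))   # take devices[i]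
--             else:
--                 memo[key] = res
--                 ret = res
--         else:
--             if ret > res:                      # take branch beat the skip branch
--                 res = ret
--             memo[key] = res
--             ret = res
--     return ret
-- ===== Notes on version B (the rewrite author's own statement) =====
-- stated objective: alternative
-- what changed: Replaces A's forward pass that grows a set of all reachable sums and takes max() at the end with a top-down take/skip decision DP (best(i,cur) = best final sum from partial sum cur over devices[i:], memoised on (i,cur), run with an explicit stack), which computes the maximum directly without ever materialising the reachable-sum set.
import Mathlib
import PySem

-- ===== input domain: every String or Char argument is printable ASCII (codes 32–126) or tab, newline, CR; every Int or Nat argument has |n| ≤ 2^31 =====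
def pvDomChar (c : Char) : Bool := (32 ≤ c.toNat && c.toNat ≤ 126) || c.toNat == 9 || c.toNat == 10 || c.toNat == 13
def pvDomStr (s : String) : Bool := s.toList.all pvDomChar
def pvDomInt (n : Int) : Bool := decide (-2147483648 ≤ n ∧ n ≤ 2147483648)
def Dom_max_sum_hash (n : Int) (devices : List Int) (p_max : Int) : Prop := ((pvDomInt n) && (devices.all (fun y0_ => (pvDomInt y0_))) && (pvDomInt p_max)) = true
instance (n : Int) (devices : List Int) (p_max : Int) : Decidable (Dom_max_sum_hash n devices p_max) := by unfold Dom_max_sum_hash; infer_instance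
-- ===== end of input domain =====

-- B replaces A's forward reachable-sum set with a memoised top-down take/skip
-- decision DP (best(i,cur) = best final sum from partial sum cur on devices[i:]);
-- Source B drives that recursion with an explicit stack to stay clear of Python's
-- recursion limit, and the port writes the same memoised recursion structurally.

-- ===== PORT A =====
def max_sum_hash (n : Int) (devices : List Int) (p_max : Int) : Int :=
  -- dp = set(); dp.add(0)
  let dp0 : PySem.Set Int := PySem.Set.add PySem.Set.empty 0
  -- for device in devices: for p in list(dp): if p + device <= p_max: dp.add(p + device)
  -- (the inner iteration order over the set snapshot cannot affect the resulting set)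
  let dp := devices.foldl
    (fun dp device =>
      dp.foldl (fun s p => if p + device ≤ p_max then PySem.Set.add s (p + device) else s) dp)
    dp0
  -- return max(dp)  (dp always contains 0, so Python's max never raises; none is unreachable)
  match PySem.List.max? dp (fun x => x) with
  | some m => m
  | none => 0

-- ===== PORT B =====
-- Source B's stack machine runs the memoised recursion best(i, cur); here the same
-- recursion is written structurally on the remaining device list (i carried along),
-- threading the memo dict exactly as Source B reads and writes it.
def bestB (pm : Int) : List Int → Int → Int → PySem.Dict (Int × Int) Int → Int × PySem.Dict (Int × Int) Int
  | [], _i, cur, memo => (cur, memo)                 -- if i == len(devices): ret = cur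
  | d :: rest, i, cur, memo =>
    match memo.get? (i, cur) with                    -- if key in memo: ret = memo[key]
    | some v => (v, memo)
    | none =>
      let r1 := bestB pm rest (i + 1) cur memo       -- skip devices[i]
      let nxt := cur + d
      if nxt ≤ pm then
        let r2 := bestB pm rest (i + 1) nxt r1.2     -- take devices[i]
        let res := if r2.1 > r1.1 then r2.1 else r1.1
        (res, r2.2.insert (i, cur) res)              -- memo[key] = res
      else
        (r1.1, r1.2.insert (i, cur) r1.1)            -- memo[key] = res

def max_sum_hash_alt (n : Int) (devices : List Int) (p_max : Int) : Int :=
  (bestB p_max devices 0 0 PySem.Dict.empty).1       -- return best(0, 0)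

-- ===== PRECONDITION & SPEC =====
def Spec_max_sum_hash (n : Int) (devices : List Int) (p_max : Int) (out : Int) : Prop := out = max_sum_hash_alt n devices p_max
instance (n : Int) (devices : List Int) (p_max : Int) (out : Int) : Decidable (Spec_max_sum_hash n devices p_max out) := by unfold Spec_max_sum_hash; infer_instance

-- ===== CLAIM (what is proved, stated in full; the proofs are below) =====
def Claim_equal_max_sum_hash : Prop := ∀ (n : Int) (devices : List Int) (p_max : Int), Dom_max_sum_hash n devices p_max → Spec_max_sum_hash n devices p_max (max_sum_hash n devices p_max)

-- ===== LEMMAS AND PROOFS =====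

-- the common mathematical value: best final sum from partial sum cur over the suffix
def gBest (pm : Int) : List Int → Int → Int
  | [], cur => cur
  | d :: t, cur =>
    if cur + d ≤ pm then max (gBest pm t cur) (gBest pm t (cur + d)) else gBest pm t cur

-- A's outer fold, named for the lemmas (definitionally the fold in the port)
def foldA (pm : Int) (devs : List Int) (S : PySem.Set Int) : PySem.Set Int :=
  devs.foldl
    (fun dp device =>
      dp.foldl (fun s p => if p + device ≤ pm then PySem.Set.add s (p + device) else s) dp)
    S

-- A's inner loop: membership in the fold of conditional Set.add
theorem memA_inner (d pm : Int) (l : List Int) (s : PySem.Set Int) (a : Int) :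
    a ∈ l.foldl (fun s p => if p + d ≤ pm then PySem.Set.add s (p + d) else s) s ↔
      a ∈ s ∨ ∃ p ∈ l, p + d ≤ pm ∧ a = p + d := by
  induction l generalizing s with
  | nil => simp
  | cons x t ih =>
      simp only [List.foldl_cons, ih]
      split_ifs with hx
      · simp [PySem.Set.mem_add]; tauto
      · simp only [List.mem_cons]
        constructor
        · rintro (h | ⟨p, hp, h1, h2⟩)
          · exact Or.inl h
          · exact Or.inr ⟨p, Or.inr hp, h1, h2⟩
        · rintro (h | ⟨p, (rfl | hp), h1, h2⟩)
          · exact Or.inl h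
          · exact absurd h1 hx
          · exact Or.inr ⟨p, hp, h1, h2⟩

-- gBest grows when a device is prepended (skip branch)
theorem gBest_le_cons (pm d : Int) (t : List Int) (q : Int) :
    gBest pm t q ≤ gBest pm (d :: t) q := by
  show gBest pm t q ≤ if q + d ≤ pm then _ else _
  split_ifs with h
  · exact le_max_left _ _
  · exact le_refl _

theorem gBest_take_le (pm d : Int) (t : List Int) (p : Int) (h : p + d ≤ pm) :
    gBest pm t (p + d) ≤ gBest pm (d :: t) p := by
  show gBest pm t (p + d) ≤ if p + d ≤ pm then _ else _
  rw [if_pos h]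
  exact le_max_right _ _

-- every value gBest promises from a member is in A's final set
theorem gA_mem (pm : Int) (devs : List Int) :
    ∀ (S : PySem.Set Int) (p : Int), p ∈ S → gBest pm devs p ∈ foldA pm devs S := by
  induction devs with
  | nil => intro S p hp; exact hp
  | cons d t ih =>
      intro S p hp
      show gBest pm (d :: t) p ∈ foldA pm t (S.foldl _ S)
      have hpS' : p ∈ S.foldl (fun s q => if q + d ≤ pm then PySem.Set.add s (q + d) else s) S :=
        (memA_inner d pm S S p).mpr (Or.inl hp)
      by_cases h : p + d ≤ pm
      · have hpd : p + d ∈ S.foldl (fun s q => if q + d ≤ pm then PySem.Set.add s (q + d) else s) S :=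
          (memA_inner d pm S S (p + d)).mpr (Or.inr ⟨p, hp, h, rfl⟩)
        show (if p + d ≤ pm then max (gBest pm t p) (gBest pm t (p + d)) else gBest pm t p) ∈ _
        rw [if_pos h]
        rcases max_choice (gBest pm t p) (gBest pm t (p + d)) with hm | hm <;> rw [hm]
        · exact ih _ p hpS'
        · exact ih _ (p + d) hpd
      · show (if p + d ≤ pm then max (gBest pm t p) (gBest pm t (p + d)) else gBest pm t p) ∈ _
        rw [if_neg h]
        exact ih _ p hpS'

-- every element of A's final set is bounded by gBest from some member
theorem gA_bound (pm : Int) (devs : List Int) :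
    ∀ (S : PySem.Set Int) (x : Int), x ∈ foldA pm devs S → ∃ p ∈ S, x ≤ gBest pm devs p := by
  induction devs with
  | nil => intro S x hx; exact ⟨x, hx, le_refl x⟩
  | cons d t ih =>
      intro S x hx
      obtain ⟨q, hq, hle⟩ := ih _ x hx
      rcases (memA_inner d pm S S q).mp hq with hqS | ⟨p, hp, hpd, rfl⟩
      · exact ⟨q, hqS, le_trans hle (gBest_le_cons pm d t q)⟩
      · exact ⟨p, hp, le_trans hle (gBest_take_le pm d t p hpd)⟩

-- A computes gBest pm devices 0
theorem portA_eq_gBest (n : Int) (devices : List Int) (pm : Int) :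
    max_sum_hash n devices pm = gBest pm devices 0 := by
  unfold max_sum_hash
  have h0mem : (0 : Int) ∈ PySem.Set.add PySem.Set.empty 0 := by
    simp [PySem.Set.add, PySem.Set.empty, PySem.Set.contains]
  have hg : gBest pm devices 0 ∈ foldA pm devices (PySem.Set.add PySem.Set.empty 0) :=
    gA_mem pm devices _ 0 h0mem
  have hb : ∀ x ∈ foldA pm devices (PySem.Set.add PySem.Set.empty 0), x ≤ gBest pm devices 0 := by
    intro x hx
    obtain ⟨p, hp, hle⟩ := gA_bound pm devices _ x hx
    have hp0 : p = 0 := by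
      simpa [PySem.Set.add, PySem.Set.empty, PySem.Set.contains] using hp
    simpa [hp0] using hle
  set S' := foldA pm devices (PySem.Set.add PySem.Set.empty 0) with hS
  have hne : S' ≠ [] := fun h => by rw [h] at hg; simp at hg
  obtain ⟨m, hm⟩ := Option.ne_none_iff_exists'.mp
    (fun h => hne ((PySem.List.max?_eq_none_iff (xs := S') (key := fun x : Int => x)).mp h))
  show (match PySem.List.max? S' (fun x : Int => x) with | some m => m | none => (0:Int)) = _
  rw [hm]
  have h1 : m ≤ gBest pm devices 0 := hb m (PySem.List.max?_mem hm)
  have h2 : gBest pm devices 0 ≤ m := PySem.List.max?_isMax hm _ hg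
  exact le_antisymm h1 h2

-- the memo invariant: every entry (j, c) ↦ v stores v = gBest pm (full.drop j) c
theorem bestB_correct (pm : Int) (full : List Int) :
    ∀ (rest : List Int) (m : Nat) (cur : Int) (memo : PySem.Dict (Int × Int) Int),
      rest = full.drop m →
      (∀ p v, memo.get? p = some v → ∃ j : Nat, p.1 = (j : Int) ∧ v = gBest pm (full.drop j) p.2) →
      (bestB pm rest (m : Int) cur memo).1 = gBest pm rest cur ∧
      (∀ p v, (bestB pm rest (m : Int) cur memo).2.get? p = some v →
        ∃ j : Nat, p.1 = (j : Int) ∧ v = gBest pm (full.drop j) p.2) := by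
  intro rest
  induction rest with
  | nil => intro m cur memo _ hinv; exact ⟨rfl, hinv⟩
  | cons d t ih =>
      intro m cur memo hrest hinv
      have ht : t = full.drop (m + 1) := by
        rw [← List.tail_drop, ← hrest]; rfl
      cases hget : memo.get? ((m : Int), cur) with
      | some v =>
          obtain ⟨j, hj, hv⟩ := hinv _ _ hget
          have hj' : (m : Int) = (j : Int) := hj
          have hjm : j = m := by exact_mod_cast hj'.symm
          subst hjm
          constructor
          · simp only [bestB, hget]
            rw [hv, ← hrest]
          · simp only [bestB, hget]
            intro p v' hpv
            exact hinv p v' hpv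
      | none =>
          obtain ⟨hr1, hinv1⟩ := ih (m + 1) cur memo ht hinv
          push_cast at hr1 hinv1
          by_cases hle : cur + d ≤ pm
          · obtain ⟨hr2, hinv2⟩ := ih (m + 1) (cur + d)
              (bestB pm t ((m : Int) + 1) cur memo).2 ht
              (by intro p v h; exact hinv1 p v h)
            push_cast at hr2 hinv2
            constructor
            · simp only [bestB, hget, if_pos hle]
              rw [hr1, hr2]
              show _ = if cur + d ≤ pm then _ else _
              rw [if_pos hle]
              rcases le_or_gt (gBest pm t (cur + d)) (gBest pm t cur) with h | h
              · rw [if_neg (not_lt.mpr h), max_eq_left h]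
              · rw [if_pos h, max_eq_right (le_of_lt h)]
            · simp only [bestB, hget, if_pos hle]
              intro p v hpv
              rw [PySem.Dict.get?_insert] at hpv
              by_cases hpk : p = ((m : Int), cur)
              · rw [if_pos hpk] at hpv
                refine ⟨m, by rw [hpk], ?_⟩
                rw [hpk]
                have hv2 : v = gBest pm (d :: t) cur := by
                  rw [← Option.some_inj.mp hpv, hr1, hr2]
                  show _ = if cur + d ≤ pm then _ else _
                  rw [if_pos hle]
                  rcases le_or_gt (gBest pm t (cur + d)) (gBest pm t cur) with h | h
                  · rw [if_neg (not_lt.mpr h), max_eq_left h]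
                  · rw [if_pos h, max_eq_right (le_of_lt h)]
                rw [hv2, ← hrest]
              · rw [if_neg hpk] at hpv
                exact hinv2 p v hpv
          · constructor
            · simp only [bestB, hget, if_neg hle]
              rw [hr1]
              show _ = if cur + d ≤ pm then _ else _
              rw [if_neg hle]
            · simp only [bestB, hget, if_neg hle]
              intro p v hpv
              rw [PySem.Dict.get?_insert] at hpv
              by_cases hpk : p = ((m : Int), cur)
              · rw [if_pos hpk] at hpv
                refine ⟨m, by rw [hpk], ?_⟩
                rw [hpk]
                have hv2 : v = gBest pm (d :: t) cur := by
                  rw [← Option.some_inj.mp hpv, hr1]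
                  show _ = if cur + d ≤ pm then _ else _
                  rw [if_neg hle]
                rw [hv2, ← hrest]
              · rw [if_neg hpk] at hpv
                exact hinv1 p v hpv

theorem portB_eq_gBest (n : Int) (devices : List Int) (pm : Int) :
    max_sum_hash_alt n devices pm = gBest pm devices 0 := by
  unfold max_sum_hash_alt
  have h := (bestB_correct pm devices devices 0 0 PySem.Dict.empty (by simp)
    (by intro p v hpv; rw [PySem.Dict.get?_empty] at hpv; cases hpv)).1
  simpa using h

-- ===== VERDICT (by name: the statement is the Claim_ definition above) =====
theorem max_sum_hash_spec : Claim_equal_max_sum_hash := by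
  intro n devices p_max _
  unfold Spec_max_sum_hash
  rw [portA_eq_gBest, portB_eq_gBest]
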